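-- pv_equiv track=rewrite | github.com/k3uual/coding-problems | TakeUForward/a_to_z/Binary-Search/On_2D-Array/matrix_median.py | cnt_row
-- ===== SOURCE A (Python) =====
-- def cnt_row(m, k):
--     low = 0
--     high = len(m) - 1
--
--     while(high >= low):
--         mid = (high + low)//2
--         if(m[mid] > k):
--             high = mid - 1
--         else:
--             low = mid + 1
--
--     return low
-- ===== SOURCE B (Python) =====
-- def cnt_row(m, k):
--     if not m:
--         return 0
--     mid = (len(m) - 1) // 2
--     if m[mid] > k:
--         return cnt_row(m[:mid], k)
--     return mid + 1 + cnt_row(m[mid+1:], k)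
-- ===== Notes on version B (the rewrite author's own statement) =====
-- stated objective: simpler
-- what changed: the iterative low/high two-pointer loop is replaced by a divide-and-conquer recursion on list slices that keeps no index state and adds the left-half size on the way back up
import Mathlib
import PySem

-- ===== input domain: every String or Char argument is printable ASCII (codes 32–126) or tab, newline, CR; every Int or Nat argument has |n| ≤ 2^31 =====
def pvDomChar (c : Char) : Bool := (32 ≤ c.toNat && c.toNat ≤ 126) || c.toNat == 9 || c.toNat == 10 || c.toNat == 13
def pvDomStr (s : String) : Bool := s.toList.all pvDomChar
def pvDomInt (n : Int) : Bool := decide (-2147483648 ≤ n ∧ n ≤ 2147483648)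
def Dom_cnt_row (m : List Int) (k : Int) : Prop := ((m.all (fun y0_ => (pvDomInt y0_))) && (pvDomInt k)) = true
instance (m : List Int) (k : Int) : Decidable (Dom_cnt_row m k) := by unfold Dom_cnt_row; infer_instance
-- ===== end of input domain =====

-- B replaces A's iterative low/high loop by a slice-based divide-and-conquer recursion (simpler, no index state).

-- ===== PORT A =====
-- the while loop, step for step; `none` (IndexError) is unreachable from cnt_row's initial window
def cntRowLoop (m : List Int) (k : Int) (low high : Int) : Int :=
  if _h : high ≥ low then
    let mid := PySem.Int.floordiv (high + low) 2
    match PySem.List.pyGet? m mid with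
    | none => low
    | some v =>
      if v > k then cntRowLoop m k low (mid - 1)
      else cntRowLoop m k (mid + 1) high
  else low
termination_by (high + 1 - low).toNat
decreasing_by
  · have h1 : PySem.Int.floordiv (high + low) 2 = PySem.Int.floordiv (low + high) 2 := by
      rw [Int.add_comm]
    have h2 := PySem.Int.floordiv_two_mid_bounds (lo := low) (hi := high) _h
    omega
  · have h1 : PySem.Int.floordiv (high + low) 2 = PySem.Int.floordiv (low + high) 2 := by
      rw [Int.add_comm]
    have h2 := PySem.Int.floordiv_two_mid_bounds (lo := low) (hi := high) _h
    omega

def cnt_row (m : List Int) (k : Int) : Int :=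
  cntRowLoop m k 0 ((m.length : Int) - 1)

-- ===== PORT B =====
-- Source B's self-recursion on slices; `none` (IndexError) is unreachable (mid < len m for nonempty m)
def cnt_row_alt (m : List Int) (k : Int) : Int :=
  if _hm : m = [] then 0
  else
    let mid := (m.length - 1) / 2
    match PySem.List.pyGet? m (mid : Int) with
    | none => 0
    | some v =>
      if v > k then cnt_row_alt (m.take mid) k
      else (mid : Int) + 1 + cnt_row_alt (m.drop (mid + 1)) k
termination_by m.length
decreasing_by
  · have : m.length ≠ 0 := fun h => _hm (List.eq_nil_of_length_eq_zero h)
    simp [List.length_take]; omega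
  · have : m.length ≠ 0 := fun h => _hm (List.eq_nil_of_length_eq_zero h)
    simp; omega

-- ===== PRECONDITION & SPEC =====
def Spec_cnt_row (m : List Int) (k : Int) (out : Int) : Prop := out = cnt_row_alt m k
instance (m : List Int) (k : Int) (out : Int) : Decidable (Spec_cnt_row m k out) := by unfold Spec_cnt_row; infer_instance

-- ===== CLAIM (what is proved, stated in full; the proofs are below) =====
def Claim_equal_cnt_row : Prop := ∀ (m : List Int) (k : Int), Dom_cnt_row m k → Spec_cnt_row m k (cnt_row m k)

-- ===== LEMMAS AND PROOFS =====

-- The loop on window [low, high] of m equals low plus B's recursion on the slice m[low : high+1].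
theorem loop_eq_alt (n : Nat) (m : List Int) (k : Int) (low high : Int)
    (hlo : 0 ≤ low) (hhi : high < (m.length : Int)) (hn : high - low + 1 = (n : Int)) :
    cntRowLoop m k low high = low + cnt_row_alt ((m.drop low.toNat).take n) k := by
  induction n using Nat.strong_induction_on generalizing low high with
  | _ n ih =>
    by_cases hge : high ≥ low
    · -- window nonempty: n ≥ 1
      have hnpos : 0 < n := by omega
      set s : List Int := (m.drop low.toNat).take n with hs
      have hslen : s.length = n := by
        simp [hs, List.length_take, List.length_drop]; omega
      have hsne : s ≠ [] := by
        intro h; rw [h] at hslen; simp at hslen; omega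
      have hmid := PySem.Int.floordiv_two_mid_bounds (lo := low) (hi := high) hge
      set midA : Int := PySem.Int.floordiv (high + low) 2 with hmidA
      -- relative midpoint
      have hmidr : midA = low + ((n - 1 : Nat) / 2 : Nat) := by
        have h2 : (0:Int) < 2 := by norm_num
        rw [hmidA, PySem.Int.floordiv_eq_ediv_of_pos h2]
        omega
      set midr : Nat := (n - 1) / 2 with hmidrdef
      have hmidrlt : midr < n := by omega
      -- element agreement
      have hidx : PySem.List.pyGet? m midA = PySem.List.pyGet? s (midr : Int) := by
        rw [hmidr]
        have h1 : low + (midr : Int) = ((low.toNat + midr : Nat) : Int) := by omega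
        rw [h1, PySem.List.pyGet?_natCast, PySem.List.pyGet?_natCast]
        rw [hs, List.getElem?_take_of_lt hmidrlt, List.getElem?_drop]
      have hv : ∃ v, PySem.List.pyGet? s (midr : Int) = some v := by
        have : midr < s.length := by omega
        exact ⟨s[midr], by rw [PySem.List.pyGet?_natCast]; exact List.getElem?_eq_getElem this⟩
      obtain ⟨v, hvs⟩ := hv
      -- unfold one step of both sides
      rw [cntRowLoop, dif_pos hge]
      rw [cnt_row_alt]
      rw [dif_neg hsne]
      have hsl : (s.length - 1) / 2 = midr := by rw [hslen]
      simp only [← hmidA, hidx, hsl, hvs]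
      by_cases hvk : v > k
      · rw [if_pos hvk, if_pos hvk]
        have hrec := ih midr hmidrlt low (midA - 1) hlo (by omega) (by omega)
        rw [hrec]
        congr 2
        rw [hs, List.take_take]
        congr 1
        omega
      · rw [if_neg hvk, if_neg hvk]
        have hn' : n - (midr + 1) < n := by omega
        have hrec := ih (n - (midr + 1)) hn' (midA + 1) high (by omega) hhi (by omega)
        rw [hrec]
        have hdrop : s.drop (midr + 1) = (m.drop (midA + 1).toNat).take (n - (midr + 1)) := by
          rw [hs, List.drop_take, List.drop_drop]
          congr 2
          omega
        rw [hdrop]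
        omega
    · -- window empty: loop returns low; n = 0, slice is []
      have hn0 : n = 0 := by omega
      rw [cntRowLoop, dif_neg hge, hn0]
      simp [cnt_row_alt]

-- ===== VERDICT (by name: the statement is the Claim_ definition above) =====
theorem cnt_row_spec : Claim_equal_cnt_row := by
  intro m k _
  unfold Spec_cnt_row cnt_row
  have h := loop_eq_alt m.length m k 0 ((m.length : Int) - 1) (by omega) (by omega) (by omega)
  simpa using h
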